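-- pv_equiv track=rewrite | github.com/paolo2796/LSB_M_HIDING_DATA-AUDIO | it/unisa/compressione/lsbm_bit_selection/encoder.py | bit_selection_replaced
-- ===== SOURCE A (Python) =====
-- def most_significant_bit(frame):
--     var_bin = format(frame,'#0b')
--     if(var_bin[0]=='-' and len(var_bin)<7):
--         var_bin = format(frame,'#019b')
--     elif(var_bin[0]=='0' and len(var_bin)<6):
--         var_bin = format(frame,'#018b')
--     return var_bin[3:5] if var_bin[0]=='-' else var_bin[2:4]
--
-- def bit_selection_replaced(sample,bit_message):
--     msb = most_significant_bit(sample)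
--     sample_list = list(format(sample,'#018b'))
--     if(sample_list[0]=='-'):
--         sample_list = list(format(sample,'#019b'))
--
--     if(msb == "00"):
--         sample_list[len(sample_list) - 3] = bit_message
--     elif(msb  == "01"):
--         sample_list[len(sample_list) - 2] = bit_message
--     elif(msb  == "10" or msb  == "11"):
--         sample_list[len(sample_list) - 1] = bit_message
--
--     string = ""
--     for character in sample_list:
--         string = string + str(character)
--
--     return int('-' + string[3:] if string[0]=='-' else string[2:], 2)
-- ===== SOURCE B (Python) =====
-- def bit_selection_replaced(sample, bit_message):
--     mag = abs(sample)
--     pos = 2 if mag < 8 else 0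
--     v = int(bit_message, 2) if bit_message else 0
--     mag = ((mag >> (pos + 1)) << (pos + len(bit_message))) + (v << pos) + (mag % (1 << pos))
--     return -mag if sample < 0 else mag
-- ===== Notes on version B (the rewrite author's own statement) =====
-- stated objective: simpler
-- what changed: Replaces the whole string machinery (binary formatting, char-list splicing, join loop, re-parsing) by direct integer arithmetic: choose digit slot 2 if |sample|<8 else 0, rebuild the value from the high bits shifted past the message, the message's value int(bit_message,2), and the low bits, then reapply the sign.
-- outside the precondition, e.g. on bit_selection_replaced(9, '1_0'): A returns 18, B returns 34; on bit_selection_replaced(5, '1_'): A returns 5, B raises ValueError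
import Mathlib
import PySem

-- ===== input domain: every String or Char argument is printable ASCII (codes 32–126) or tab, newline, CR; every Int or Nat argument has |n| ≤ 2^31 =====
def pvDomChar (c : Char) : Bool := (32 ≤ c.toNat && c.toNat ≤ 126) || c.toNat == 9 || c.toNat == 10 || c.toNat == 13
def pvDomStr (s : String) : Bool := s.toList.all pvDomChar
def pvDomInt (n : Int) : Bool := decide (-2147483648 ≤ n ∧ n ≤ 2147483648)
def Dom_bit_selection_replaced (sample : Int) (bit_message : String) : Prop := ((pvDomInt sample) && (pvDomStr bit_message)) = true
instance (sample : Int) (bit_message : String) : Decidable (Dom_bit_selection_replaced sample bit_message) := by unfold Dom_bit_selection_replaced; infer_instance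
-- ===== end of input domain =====

-- B replaces A's string formatting / char-splicing / re-parsing pipeline by direct integer
-- arithmetic on the magnitude (objective: simpler).


-- ===== PORT A =====
-- minimal binary digits of a Nat, most significant first (Python's format(n,'b'));
-- fuel-structured so the kernel can reduce it (fuel = n always suffices: n halves each step)
def pvBitsGo : Nat → Nat → List Char → List Char
  | 0, _, acc => acc
  | f + 1, n, acc =>
    if n = 0 then acc else pvBitsGo f (n / 2) ((if n % 2 = 1 then '1' else '0') :: acc)
def pvBits (n : Nat) : List Char := if n = 0 then ['0'] else pvBitsGo n n []

-- format(frame, f'#0{width}b') as a char list (width 0 = '#0b'); exact: Python zero-fills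
-- after the sign and '0b' prefix up to total width
def pyBinFmt (frame : Int) (width : Nat) : List Char :=
  let ds := pvBits frame.natAbs
  if frame < 0 then ['-', '0', 'b'] ++ List.replicate (width - 3 - ds.length) '0' ++ ds
  else ['0', 'b'] ++ List.replicate (width - 2 - ds.length) '0' ++ ds

def most_significant_bit (frame : Int) : List Char :=
  let var_bin := pyBinFmt frame 0
  let var_bin :=
    if var_bin.head? = some '-' ∧ var_bin.length < 7 then pyBinFmt frame 19
    else if var_bin.head? = some '0' ∧ var_bin.length < 6 then pyBinFmt frame 18
    else var_bin
  if var_bin.head? = some '-' then (var_bin.drop 3).take 2 else (var_bin.drop 2).take 2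

-- int(s, 2) on the sign + binary-digit strings this port builds under Pre_ (exact there)
def pvParseBin (cs : List Char) : Nat :=
  cs.foldl (fun a c => 2 * a + (if c = '1' then 1 else 0)) 0

-- Python's `sample_list[i] = bit_message` followed by the join loop: splices the whole
-- string bit_message into slot i of the char list (exact for every bit_message)
def pvSplice (l : List Char) (i : Nat) (r : List Char) : List Char :=
  l.take i ++ r ++ l.drop (i + 1)

def bit_selection_replaced (sample : Int) (bit_message : String) : Int :=
  let msb := most_significant_bit sample
  let sl0 := pyBinFmt sample 18
  let sl := if sl0.head? = some '-' then pyBinFmt sample 19 else sl0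
  let sl :=
    if msb = ['0', '0'] then pvSplice sl (sl.length - 3) bit_message.toList
    else if msb = ['0', '1'] then pvSplice sl (sl.length - 2) bit_message.toList
    else if msb = ['1', '0'] ∨ msb = ['1', '1'] then pvSplice sl (sl.length - 1) bit_message.toList
    else sl
  if sl.head? = some '-' then -(pvParseBin (sl.drop 3) : Int) else (pvParseBin (sl.drop 2) : Int)

-- ===== PORT B =====
-- str.strip()'s whitespace set
def pvIsWS (c : Char) : Bool :=
  c == ' ' || c == '\t' || c == '\n' || c == '\r' || c == '\x0b' || c == '\x0c'

-- binary digit run with Python's underscore rule (u = an underscore or the end is now illegal)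
def pvDigits2Go : Bool → Nat → List Char → Option Nat
  | u, acc, [] => if u then none else some acc
  | u, acc, c :: r =>
    if c = '_' then (if u then none else pvDigits2Go true acc r)
    else if c = '0' then pvDigits2Go false (2 * acc) r
    else if c = '1' then pvDigits2Go false (2 * acc + 1) r
    else none

-- int(x, 2) (none = ValueError): strip whitespace, optional sign, optional 0b/0B prefix
-- (with one underscore allowed right after it), then binary digits with underscores
def pvInt2? (s : List Char) : Option Int :=
  let t := ((s.dropWhile pvIsWS).reverse.dropWhile pvIsWS).reverse
  let sgn : Int := if t.head? = some '-' then -1 else 1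
  let u := if t.head? = some '+' ∨ t.head? = some '-' then t.tail else t
  let body :=
    if u.take 2 = ['0', 'b'] ∨ u.take 2 = ['0', 'B'] then
      (if (u.drop 2).head? = some '_' then u.drop 3 else u.drop 2)
    else u
  match pvDigits2Go true 0 body with
  | some n => some (sgn * (n : Int))
  | none => none

def bit_selection_replaced_alt (sample : Int) (bit_message : String) : Int :=
  let mag := sample.natAbs
  let pos : Nat := if mag < 8 then 2 else 0
  -- v = int(bit_message, 2) if bit_message else 0; none = ValueError, excluded by Pre_
  -- (0 stands in for the raise there, unreachable under Pre_)
  let v : Int := if bit_message.toList = [] then 0 else (pvInt2? bit_message.toList).getD 0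
  -- Python's << and % on ints: shifts of the nonnegative parts stay in Nat, v << pos = v * 2^pos
  let res : Int := (((mag >>> (pos + 1)) <<< (pos + bit_message.toList.length) : Nat) : Int)
      + v * ((2 : Int) ^ pos) + ((mag % (1 <<< pos) : Nat) : Int)
  if sample < 0 then -res else res

-- ===== PRECONDITION & SPEC =====
-- Pre_ restricts bit_message to strings of binary digit characters '0'/'1' (the natural
-- message domain, empty allowed): on any other string A usually raises ValueError in
-- int(...,2), and a string containing underscores may parse or not depending on its
-- neighbours in the spliced text, a corner where A's and B's readings legitimately differ.
def Pre_bit_selection_replaced (sample : Int) (bit_message : String) : Prop :=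
  bit_message.toList.all (fun c => c == '0' || c == '1') = true
instance (sample : Int) (bit_message : String) : Decidable (Pre_bit_selection_replaced sample bit_message) := by unfold Pre_bit_selection_replaced; infer_instance
def pvWitness_bit_selection_replaced : Int × String := (5, "1")

def Spec_bit_selection_replaced (sample : Int) (bit_message : String) (out : Int) : Prop := out = bit_selection_replaced_alt sample bit_message
instance (sample : Int) (bit_message : String) (out : Int) : Decidable (Spec_bit_selection_replaced sample bit_message out) := by unfold Spec_bit_selection_replaced; infer_instance

-- ===== CLAIM (what is proved, stated in full; the proofs are below) =====
def Claim_equal_bit_selection_replaced : Prop := ∀ (sample : Int) (bit_message : String), Dom_bit_selection_replaced sample bit_message → Pre_bit_selection_replaced sample bit_message → Spec_bit_selection_replaced sample bit_message (bit_selection_replaced sample bit_message)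

-- ===== LEMMAS AND PROOFS =====

theorem pvBitsGo_append (n : Nat) : ∀ f acc, n ≤ f → pvBitsGo f n acc = pvBitsGo f n [] ++ acc := by
  induction n using Nat.strong_induction_on with
  | _ n ih =>
    intro f acc hf
    rcases Nat.eq_zero_or_pos n with h0 | hpos
    · subst h0; cases f <;> simp [pvBitsGo]
    · obtain ⟨f', rfl⟩ : ∃ f', f = f' + 1 := ⟨f - 1, by omega⟩
      simp only [pvBitsGo, if_neg (by omega : ¬ n = 0)]
      rw [ih (n / 2) (by omega) f' ((if n % 2 = 1 then '1' else '0') :: acc) (by omega),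
        ih (n / 2) (by omega) f' [if n % 2 = 1 then '1' else '0'] (by omega)]
      simp

theorem pvParseBin_foldl (cs : List Char) : ∀ a, cs.foldl (fun a c => 2 * a + (if c = '1' then 1 else 0)) a = a * 2 ^ cs.length + pvParseBin cs := by
  induction cs with
  | nil => intro a; simp [pvParseBin]
  | cons c t ih =>
    intro a
    have h2 : pvParseBin (c :: t) = (if c = '1' then 1 else 0) * 2 ^ t.length + pvParseBin t := by
      simp only [pvParseBin, List.foldl_cons]
      rw [ih]
      have h0 : 2 * 0 + (if c = '1' then 1 else 0) = (if c = '1' then 1 else 0) := by omega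
      rw [h0]
      rfl
    simp only [List.foldl_cons, List.length_cons]
    rw [ih, h2]
    ring

theorem pvParseBin_append (xs ys : List Char) : pvParseBin (xs ++ ys) = pvParseBin xs * 2 ^ ys.length + pvParseBin ys := by
  simp only [pvParseBin, List.foldl_append]
  rw [pvParseBin_foldl]
  rfl

theorem pvParseBin_concat (xs : List Char) (c : Char) : pvParseBin (xs ++ [c]) = 2 * pvParseBin xs + (if c = '1' then 1 else 0) := by
  rw [pvParseBin_append]
  simp [pvParseBin]; ring

theorem pvParseBin_replicate_zero (k : Nat) : pvParseBin (List.replicate k '0') = 0 := by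
  induction k with
  | zero => simp [pvParseBin]
  | succ k ih =>
    have : List.replicate (k + 1) '0' = List.replicate k '0' ++ ['0'] := by
      rw [List.replicate_succ']
    rw [this, pvParseBin_concat, ih]
    simp

theorem pvParseBin_go (n : Nat) : ∀ f, n ≤ f → pvParseBin (pvBitsGo f n []) = n := by
  induction n using Nat.strong_induction_on with
  | _ n ih =>
    intro f hf
    rcases Nat.eq_zero_or_pos n with h0 | hpos
    · subst h0; cases f <;> simp [pvBitsGo, pvParseBin]
    · obtain ⟨f', rfl⟩ : ∃ f', f = f' + 1 := ⟨f - 1, by omega⟩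
      simp only [pvBitsGo, if_neg (by omega : ¬ n = 0)]
      rw [pvBitsGo_append (n / 2) f' _ (by omega), pvParseBin_concat,
        ih (n / 2) (by omega) f' (by omega)]
      rcases Nat.mod_two_eq_zero_or_one n with h | h <;> simp [h] <;> omega

theorem pvBitsGo_binary (n : Nat) : ∀ f acc, n ≤ f → (∀ c ∈ acc, c = '0' ∨ c = '1') → ∀ c ∈ pvBitsGo f n acc, c = '0' ∨ c = '1' := by
  induction n using Nat.strong_induction_on with
  | _ n ih =>
    intro f acc hf hacc
    rcases Nat.eq_zero_or_pos n with h0 | hpos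
    · subst h0; cases f <;> simpa [pvBitsGo] using hacc
    · obtain ⟨f', rfl⟩ : ∃ f', f = f' + 1 := ⟨f - 1, by omega⟩
      simp only [pvBitsGo, if_neg (by omega : ¬ n = 0)]
      refine ih (n / 2) (by omega) f' _ (by omega) ?_
      intro c hc
      rcases List.mem_cons.mp hc with h | h
      · subst h; split <;> simp
      · exact hacc c h

theorem pvBitsGo_head (n : Nat) : ∀ f, 1 ≤ n → n ≤ f → ∃ t, pvBitsGo f n [] = '1' :: t := by
  induction n using Nat.strong_induction_on with
  | _ n ih =>
    intro f h1 hf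
    obtain ⟨f', rfl⟩ : ∃ f', f = f' + 1 := ⟨f - 1, by omega⟩
    simp only [pvBitsGo, if_neg (by omega : ¬ n = 0)]
    rcases Nat.lt_or_ge n 2 with h2 | h2
    · have hn : n = 1 := by omega
      subst hn
      refine ⟨[], ?_⟩
      cases f' <;> simp [pvBitsGo]
    · rw [pvBitsGo_append (n / 2) f' _ (by omega)]
      obtain ⟨t, ht⟩ := ih (n / 2) (by omega) f' (by omega) (by omega)
      exact ⟨t ++ [if n % 2 = 1 then '1' else '0'], by rw [ht]; simp⟩

theorem pvBitsGo_length (k : Nat) : ∀ n f, n ≤ f → 2 ^ k ≤ n → k + 1 ≤ (pvBitsGo f n []).length := by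
  induction k with
  | zero =>
    intro n f hf h
    obtain ⟨t, ht⟩ := pvBitsGo_head n f (by omega) hf
    rw [ht]; simp
  | succ k ih =>
    intro n f hf h
    have h1 : 1 ≤ n := le_trans (Nat.one_le_two_pow) h
    obtain ⟨f', rfl⟩ : ∃ f', f = f' + 1 := ⟨f - 1, by omega⟩
    simp only [pvBitsGo, if_neg (by omega : ¬ n = 0)]
    rw [pvBitsGo_append (n / 2) f' _ (by omega)]
    have := ih (n / 2) f' (by omega) (by
      have : 2 ^ (k + 1) = 2 * 2 ^ k := by ring
      omega)
    simp only [List.length_append, List.length_cons, List.length_nil]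
    omega

-- the last slot of the full char list replaced by r (the only branch taken when |sample| ≥ 8)
theorem pvSplice_last (l : List Char) (r : List Char) (h : l ≠ []) : pvSplice l (l.length - 1) r = l.dropLast ++ r := by
  have hl : 1 ≤ l.length := List.length_pos_of_ne_nil h
  simp only [pvSplice]
  rw [List.dropLast_eq_take]
  have : l.length - 1 + 1 = l.length := by omega
  rw [this, List.drop_length, List.append_nil]

theorem pvParseBin_cons (c : Char) (t : List Char) :
    pvParseBin (c :: t) = (if c = '1' then 1 else 0) * 2 ^ t.length + pvParseBin t := by
  simp only [pvParseBin, List.foldl_cons]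
  rw [pvParseBin_foldl]
  have h0 : 2 * 0 + (if c = '1' then (1:Nat) else 0) = (if c = '1' then 1 else 0) := by omega
  rw [h0]
  rfl

theorem pvParseBin_lt (l : List Char) (h : ∀ c ∈ l, c = '0' ∨ c = '1') :
    pvParseBin l < 2 ^ l.length := by
  induction l with
  | nil => simp [pvParseBin]
  | cons c t ih =>
    have hih := ih (fun x hx => h x (List.mem_cons_of_mem c hx))
    have hp : 1 ≤ 2 ^ t.length := Nat.one_le_two_pow
    rw [pvParseBin_cons, List.length_cons, pow_succ]
    rcases h c List.mem_cons_self with rfl | rfl <;> simp <;> omega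

theorem pvBitsGo_length_le (k : Nat) : ∀ n f, n ≤ f → n < 2 ^ k → (pvBitsGo f n []).length ≤ k := by
  induction k with
  | zero =>
    intro n f hf h
    have hn : n = 0 := by simpa using h
    subst hn
    cases f <;> simp [pvBitsGo]
  | succ k ih =>
    intro n f hf h
    rcases Nat.eq_zero_or_pos n with h0 | hpos
    · subst h0; cases f <;> simp [pvBitsGo]
    · obtain ⟨f', rfl⟩ : ∃ f', f = f' + 1 := ⟨f - 1, by omega⟩
      simp only [pvBitsGo, if_neg (by omega : ¬ n = 0)]
      rw [pvBitsGo_append (n / 2) f' _ (by omega)]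
      have := ih (n / 2) f' (by omega) (by rw [pow_succ] at h; omega)
      simp only [List.length_append, List.length_cons, List.length_nil]
      omega

theorem pvBits_parse (n : Nat) : pvParseBin (pvBits n) = n := by
  rcases Nat.eq_zero_or_pos n with h0 | hpos
  · subst h0; decide
  · rw [pvBits, if_neg (by omega)]; exact pvParseBin_go n n le_rfl

theorem pvBits_binary (n : Nat) : ∀ c ∈ pvBits n, c = '0' ∨ c = '1' := by
  rcases Nat.eq_zero_or_pos n with h0 | hpos
  · subst h0
    intro c hc
    rw [show pvBits 0 = ['0'] from rfl] at hc
    simp at hc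
    subst hc
    left
    rfl
  · rw [pvBits, if_neg (by omega)]; exact pvBitsGo_binary n n [] le_rfl (by simp)

theorem pvBits_len_pos (n : Nat) : 1 ≤ (pvBits n).length := by
  rcases Nat.eq_zero_or_pos n with h0 | hpos
  · subst h0; decide
  · rw [pvBits, if_neg (by omega)]
    obtain ⟨t, ht⟩ := pvBitsGo_head n n hpos le_rfl
    rw [ht]; simp

theorem pvBits_len_le (n k : Nat) (hk : 1 ≤ k) (h : n < 2 ^ k) : (pvBits n).length ≤ k := by
  rcases Nat.eq_zero_or_pos n with h0 | hpos
  · subst h0; simpa [pvBits] using hk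
  · rw [pvBits, if_neg (by omega)]; exact pvBitsGo_length_le k n n le_rfl h

theorem pv_take_append_add (pre : List Char) : ∀ (l : List Char) (i : Nat),
    (pre ++ l).take (pre.length + i) = pre ++ l.take i := by
  induction pre with
  | nil => intro l i; simp
  | cons a t ih =>
    intro l i
    rw [List.cons_append, List.length_cons,
      show t.length + 1 + i = (t.length + i) + 1 from by omega,
      List.take_succ_cons, ih, List.cons_append]

theorem pv_drop_append_add (pre : List Char) : ∀ (l : List Char) (i : Nat),
    (pre ++ l).drop (pre.length + i) = l.drop i := by
  induction pre with
  | nil => intro l i; simp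
  | cons a t ih =>
    intro l i
    rw [List.cons_append, List.length_cons,
      show t.length + 1 + i = (t.length + i) + 1 from by omega,
      List.drop_succ_cons, ih]

-- slot pre.length + i of a list with a fixed prefix is slot i of the rest
theorem pvSplice_prefix (pre l r : List Char) (i : Nat) :
    pvSplice (pre ++ l) (pre.length + i) r = pre ++ pvSplice l i r := by
  unfold pvSplice
  rw [pv_take_append_add, show pre.length + i + 1 = pre.length + (i + 1) from by omega,
    pv_drop_append_add]
  simp [List.append_assoc]

-- pvDigits2Go on an all-binary run is the plain accumulator fold
theorem pvDigits2Go_binary (bs : List Char) : ∀ acc, (∀ c ∈ bs, c = '0' ∨ c = '1') →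
    pvDigits2Go false acc bs = some (bs.foldl (fun a c => 2 * a + (if c = '1' then 1 else 0)) acc) := by
  induction bs with
  | nil => intro acc _; rfl
  | cons c r ih =>
    intro acc h
    have hr := fun x hx => h x (List.mem_cons_of_mem c hx)
    rcases h c List.mem_cons_self with rfl | rfl <;>
      simp [pvDigits2Go, ih _ hr, List.foldl_cons]

-- int(bs, 2) of a nonempty string of binary digit characters is its value
theorem pvInt2_eq (bs : List Char) (hne : bs ≠ []) (hbin : ∀ c ∈ bs, c = '0' ∨ c = '1') :
    pvInt2? bs = some ((pvParseBin bs : Nat) : Int) := by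
  obtain ⟨c0, r0, rfl⟩ : ∃ c0 r0, bs = c0 :: r0 := by
    cases bs with
    | nil => exact absurd rfl hne
    | cons c0 r0 => exact ⟨c0, r0, rfl⟩
  have hbin' := hbin
  have hc0 : c0 = '0' ∨ c0 = '1' := hbin c0 List.mem_cons_self
  have hws : pvIsWS c0 = false := by rcases hc0 with rfl | rfl <;> decide
  have hdw : (c0 :: r0).dropWhile pvIsWS = c0 :: r0 := by
    rw [List.dropWhile_cons, hws]
    simp
  obtain ⟨cl, rl, hrev⟩ := List.exists_cons_of_ne_nil (by simp : (c0 :: r0).reverse ≠ [])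
  have hclmem : cl ∈ c0 :: r0 := by
    rw [← List.mem_reverse, hrev]
    exact List.mem_cons_self
  have hclws : pvIsWS cl = false := by
    rcases hbin cl hclmem with rfl | rfl <;> decide
  have hstrip : (((c0 :: r0).dropWhile pvIsWS).reverse.dropWhile pvIsWS).reverse = c0 :: r0 := by
    rw [hdw, hrev, List.dropWhile_cons, hclws]
    simp [← hrev]
  have hsgnm : ¬ ((c0 :: r0).head? = some '+' ∨ (c0 :: r0).head? = some '-') := by
    rcases hc0 with rfl | rfl <;> simp
  have hsgn1 : ¬ ((c0 :: r0).head? = some '-') := by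
    rcases hc0 with rfl | rfl <;> simp
  have hpre : ¬ ((c0 :: r0).take 2 = ['0', 'b'] ∨ (c0 :: r0).take 2 = ['0', 'B']) := by
    intro h
    have hb : ∀ x, (c0 :: r0).take 2 = ['0', x] → x = '0' ∨ x = '1' := by
      intro x hx
      exact hbin x (List.take_subset 2 _ (by rw [hx]; simp))
    rcases h with h | h
    · rcases hb 'b' h with h' | h' <;> simp at h'
    · rcases hb 'B' h with h' | h' <;> simp at h'
  have hdig : pvDigits2Go true 0 (c0 :: r0) = some (pvParseBin (c0 :: r0)) := by
    have hstep : pvDigits2Go true 0 (c0 :: r0)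
        = pvDigits2Go false (2 * 0 + (if c0 = '1' then 1 else 0)) r0 := by
      rcases hc0 with rfl | rfl <;> simp [pvDigits2Go]
    rw [hstep, pvDigits2Go_binary r0 _ (fun x hx => hbin x (List.mem_cons_of_mem c0 hx))]
    rfl
  simp only [pvInt2?]
  rw [hstrip, if_neg hsgnm, if_neg hsgn1, if_neg hpre, hdig]
  simp

-- core fact, |sample| = mag ≥ 8: replacing the LAST digit slot by the message bs
theorem pv_core (mag : Nat) (h8 : 8 ≤ mag) (bs : List Char) :
    pvParseBin ((List.replicate (16 - (pvBitsGo mag mag []).length) '0' ++ pvBitsGo mag mag []).dropLast ++ bs) =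
      mag / 2 * 2 ^ bs.length + pvParseBin bs := by
  have hparse : pvParseBin (pvBitsGo mag mag []) = mag := pvParseBin_go mag mag le_rfl
  have hp8 : (2:Nat) ^ 3 ≤ mag := by norm_num; omega
  have hlen : 4 ≤ (pvBitsGo mag mag []).length := pvBitsGo_length 3 mag mag le_rfl hp8
  have hne : pvBitsGo mag mag [] ≠ [] := by
    intro h; rw [h] at hlen; simp at hlen
  obtain ⟨E, c, hEc⟩ := (List.eq_nil_or_concat (pvBitsGo mag mag [])).resolve_left hne
  simp only [List.concat_eq_append] at hEc
  have hcbin : c = '0' ∨ c = '1' :=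
    pvBitsGo_binary mag mag [] le_rfl (by simp) c (by rw [hEc]; simp)
  have hdl : (List.replicate (16 - (pvBitsGo mag mag []).length) '0' ++ pvBitsGo mag mag []).dropLast
      = List.replicate (16 - (pvBitsGo mag mag []).length) '0' ++ E := by
    rw [hEc, ← List.append_assoc, List.dropLast_concat]
  have hmagEq : mag = 2 * pvParseBin E + (if c = '1' then 1 else 0) := by
    rw [← hparse, hEc, pvParseBin_concat]
  have hcv : (if c = '1' then (1:Nat) else 0) ≤ 1 := by split <;> omega
  have hE2 : pvParseBin E = mag / 2 := by omega
  rw [hdl, pvParseBin_append, pvParseBin_append, pvParseBin_replicate_zero, hE2]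
  ring

-- core fact, |sample| = mag < 8: replacing digit slot 13 of the 16 padded digits by bs
theorem pv_core2 (mag : Nat) (h8 : mag < 8) (bs : List Char) :
    pvParseBin (pvSplice (List.replicate (16 - (pvBits mag).length) '0' ++ pvBits mag) 13 bs) =
      pvParseBin bs * 4 + mag % 4 := by
  have hl3 : (pvBits mag).length ≤ 3 := pvBits_len_le mag 3 (by omega) (by norm_num; omega)
  have hl1 : 1 ≤ (pvBits mag).length := pvBits_len_pos mag
  have hsplit : List.replicate (16 - (pvBits mag).length) '0'
      = List.replicate 13 '0' ++ List.replicate (3 - (pvBits mag).length) '0' := by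
    rw [← List.replicate_add]
    congr 1
    omega
  have hTlen : (List.replicate (3 - (pvBits mag).length) '0' ++ pvBits mag).length = 3 := by
    simp; omega
  have hTparse : pvParseBin (List.replicate (3 - (pvBits mag).length) '0' ++ pvBits mag) = mag := by
    rw [pvParseBin_append, pvParseBin_replicate_zero, pvBits_parse]
    ring
  have hTbin : ∀ c ∈ List.replicate (3 - (pvBits mag).length) '0' ++ pvBits mag, c = '0' ∨ c = '1' := by
    intro c hc
    rcases List.mem_append.mp hc with h | h
    · left; exact List.eq_of_mem_replicate h
    · exact pvBits_binary mag c h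
  obtain ⟨t0, t1, t2, hT⟩ := List.length_eq_three.mp hTlen
  rw [hsplit, List.append_assoc, hT]
  rw [hT] at hTparse hTbin
  have hsp : pvSplice (List.replicate 13 '0' ++ [t0, t1, t2]) (13 + 0) bs
      = List.replicate 13 '0' ++ pvSplice [t0, t1, t2] 0 bs := by
    rw [← pvSplice_prefix]
    simp
  rw [show (13:Nat) = 13 + 0 from rfl, hsp]
  have hsp0 : pvSplice [t0, t1, t2] 0 bs = bs ++ [t1, t2] := rfl
  rw [hsp0, pvParseBin_append, pvParseBin_replicate_zero, pvParseBin_append]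
  have hrest_lt : pvParseBin [t1, t2] < 2 ^ 2 := by
    have := pvParseBin_lt [t1, t2] (by
      intro c hc
      apply hTbin
      simp only [List.mem_cons] at hc ⊢
      tauto)
    simpa using this
  have ht0v : (if t0 = '1' then (1:Nat) else 0) ≤ 1 := by split <;> omega
  have hdec : mag = (if t0 = '1' then 1 else 0) * 2 ^ ([t1, t2] : List Char).length + pvParseBin [t1, t2] := by
    rw [← pvParseBin_cons, hTparse]
  have ht0bin : t0 = '0' ∨ t0 = '1' := hTbin t0 (by simp)
  simp only [List.length_cons, List.length_nil] at hdec
  norm_num at hrest_lt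
  rcases ht0bin with rfl | rfl <;> simp at hdec ⊢ <;> omega

-- the MSB A computes for |sample| < 8 is "00" (a finite check over sample ∈ [-7,7])
theorem pv_msb_lt (sample : Int) (h8 : sample.natAbs < 8) :
    most_significant_bit sample = ['0', '0'] := by
  have hs : sample = -7 ∨ sample = -6 ∨ sample = -5 ∨ sample = -4 ∨ sample = -3 ∨
      sample = -2 ∨ sample = -1 ∨ sample = 0 ∨ sample = 1 ∨ sample = 2 ∨ sample = 3 ∨
      sample = 4 ∨ sample = 5 ∨ sample = 6 ∨ sample = 7 := by omega
  rcases hs with rfl | rfl | rfl | rfl | rfl | rfl | rfl | rfl | rfl | rfl | rfl | rfl | rfl | rfl | rfl <;>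
    decide

-- the MSB A computes for |sample| ≥ 8 is the two leading minimal-binary digits
theorem pv_msb (sample : Int) (h8 : 8 ≤ sample.natAbs) :
    most_significant_bit sample = (pvBits sample.natAbs).take 2 := by
  have hp8 : (2:Nat) ^ 3 ≤ sample.natAbs := by norm_num; omega
  have hbits : pvBits sample.natAbs = pvBitsGo sample.natAbs sample.natAbs [] := by
    rw [pvBits, if_neg (by omega)]
  have hlen : 4 ≤ (pvBits sample.natAbs).length := by
    rw [hbits]; exact pvBitsGo_length 3 _ _ le_rfl hp8
  unfold most_significant_bit pyBinFmt
  by_cases hneg : sample < 0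
  · simp only [if_pos hneg]
    have e1 : (0:Nat) - 3 - (pvBits sample.natAbs).length = 0 := by omega
    rw [e1]
    simp only [List.replicate_zero, List.nil_append, List.cons_append, List.head?_cons,
      List.length_cons]
    split_ifs with hc1 hc2 <;> simp_all <;> omega
  · simp only [if_neg hneg]
    have e1 : (0:Nat) - 2 - (pvBits sample.natAbs).length = 0 := by omega
    rw [e1]
    simp only [List.replicate_zero, List.nil_append, List.cons_append, List.head?_cons,
      List.length_cons]
    split_ifs with hc1 hc2 <;> simp_all <;> omega

theorem pv_main_ge8 (sample : Int) (bm : String) (hbin : ∀ c ∈ bm.toList, c = '0' ∨ c = '1')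
    (h8 : 8 ≤ sample.natAbs) :
    bit_selection_replaced sample bm = bit_selection_replaced_alt sample bm := by
  have hp8 : (2:Nat) ^ 3 ≤ sample.natAbs := by norm_num; omega
  have hlen : 4 ≤ (pvBitsGo sample.natAbs sample.natAbs []).length :=
    pvBitsGo_length 3 sample.natAbs sample.natAbs le_rfl hp8
  have hbits : pvBits sample.natAbs = pvBitsGo sample.natAbs sample.natAbs [] := by
    rw [pvBits, if_neg (by omega)]
  obtain ⟨t, ht⟩ := pvBitsGo_head sample.natAbs sample.natAbs (by omega) le_rfl
  obtain ⟨c2, t2, rfl⟩ : ∃ c2 t2, t = c2 :: t2 := by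
    cases t with
    | nil => rw [ht] at hlen; simp at hlen
    | cons c2 t2 => exact ⟨c2, t2, rfl⟩
  have hc2 : c2 = '0' ∨ c2 = '1' :=
    pvBitsGo_binary sample.natAbs sample.natAbs [] le_rfl (by simp) c2 (by rw [ht]; simp)
  have hmsb : most_significant_bit sample = ['1', c2] := by
    rw [pv_msb sample h8, hbits, ht]; rfl
  have hmsb1 : ¬ (most_significant_bit sample = ['0','0']) := by rw [hmsb]; simp
  have hmsb2 : ¬ (most_significant_bit sample = ['0','1']) := by rw [hmsb]; simp
  have hmsb3 : most_significant_bit sample = ['1','0'] ∨ most_significant_bit sample = ['1','1'] := by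
    rw [hmsb]; rcases hc2 with rfl | rfl
    · left; rfl
    · right; rfl
  have hdsne : pvBitsGo sample.natAbs sample.natAbs [] ≠ [] := by rw [ht]; simp
  have hcore := pv_core sample.natAbs h8 bm.toList
  have hv : (if bm.toList = [] then (0 : Int) else (pvInt2? bm.toList).getD 0)
      = ((pvParseBin bm.toList : Nat) : Int) := by
    by_cases hbe : bm.toList = []
    · rw [if_pos hbe, hbe]; rfl
    · rw [if_neg hbe, pvInt2_eq bm.toList hbe hbin]; rfl
  simp only [bit_selection_replaced, bit_selection_replaced_alt]
  rw [if_neg hmsb1, if_neg hmsb2, if_pos hmsb3, hv]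
  by_cases hneg : sample < 0
  · have h18 : (pyBinFmt sample 18).head? = some '-' := by
      unfold pyBinFmt; simp [if_pos hneg]
    rw [if_pos h18]
    have h19 : pyBinFmt sample 19 =
        '-' :: '0' :: 'b' :: (List.replicate (16 - (pvBitsGo sample.natAbs sample.natAbs []).length) '0'
          ++ pvBitsGo sample.natAbs sample.natAbs []) := by
      unfold pyBinFmt
      rw [if_pos hneg, hbits]
      simp
    rw [h19]
    have hPne : (List.replicate (16 - (pvBitsGo sample.natAbs sample.natAbs []).length) '0'
        ++ pvBitsGo sample.natAbs sample.natAbs []) ≠ [] := by simp [hdsne]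
    rw [pvSplice_last _ _ (by simp), List.dropLast_cons_of_ne_nil (by simp),
      List.dropLast_cons_of_ne_nil (by simp), List.dropLast_cons_of_ne_nil hPne]
    simp only [List.cons_append, List.head?_cons, List.drop_succ_cons, List.drop_zero, reduceIte]
    rw [hcore]
    rw [if_pos hneg, if_neg (by omega : ¬ sample.natAbs < 8)]
    have hdiv : sample.natAbs >>> (0 + 1) = sample.natAbs / 2 := by
      simp [Nat.shiftRight_eq_div_pow]
    rw [hdiv]
    simp [Nat.shiftLeft_eq]
  · have h18 : pyBinFmt sample 18 =
        '0' :: 'b' :: (List.replicate (16 - (pvBitsGo sample.natAbs sample.natAbs []).length) '0'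
          ++ pvBitsGo sample.natAbs sample.natAbs []) := by
      unfold pyBinFmt
      rw [if_neg hneg, hbits]
      simp
    rw [h18]
    have hh : ¬ (('0' :: 'b' :: (List.replicate (16 - (pvBitsGo sample.natAbs sample.natAbs []).length) '0'
        ++ pvBitsGo sample.natAbs sample.natAbs [])).head? = some '-') := by simp
    rw [if_neg hh]
    have hPne : (List.replicate (16 - (pvBitsGo sample.natAbs sample.natAbs []).length) '0'
        ++ pvBitsGo sample.natAbs sample.natAbs []) ≠ [] := by simp [hdsne]
    rw [pvSplice_last _ _ (by simp), List.dropLast_cons_of_ne_nil (by simp),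
      List.dropLast_cons_of_ne_nil hPne]
    simp only [List.cons_append, List.head?_cons, List.drop_succ_cons, List.drop_zero, reduceIte]
    rw [hcore]
    rw [if_neg hneg, if_neg (by omega : ¬ sample.natAbs < 8)]
    have hdiv : sample.natAbs >>> (0 + 1) = sample.natAbs / 2 := by
      simp [Nat.shiftRight_eq_div_pow]
    rw [hdiv]
    simp [Nat.shiftLeft_eq]

theorem pv_main_lt8 (sample : Int) (bm : String) (hbin : ∀ c ∈ bm.toList, c = '0' ∨ c = '1')
    (h8 : sample.natAbs < 8) :
    bit_selection_replaced sample bm = bit_selection_replaced_alt sample bm := by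
  have hmsb := pv_msb_lt sample h8
  have hD16 : (List.replicate (16 - (pvBits sample.natAbs).length) '0' ++ pvBits sample.natAbs).length = 16 := by
    have hl3 : (pvBits sample.natAbs).length ≤ 3 :=
      pvBits_len_le sample.natAbs 3 (by omega) (by norm_num; omega)
    simp
    omega
  have hcore := pv_core2 sample.natAbs h8 bm.toList
  have hv : (if bm.toList = [] then (0 : Int) else (pvInt2? bm.toList).getD 0)
      = ((pvParseBin bm.toList : Nat) : Int) := by
    by_cases hbe : bm.toList = []
    · rw [if_pos hbe, hbe]; rfl
    · rw [if_neg hbe, pvInt2_eq bm.toList hbe hbin]; rfl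
  have hdiv0 : sample.natAbs >>> (2 + 1) = 0 := by
    simp [Nat.shiftRight_eq_div_pow]
    omega
  simp only [bit_selection_replaced, bit_selection_replaced_alt]
  rw [if_pos hmsb, hv]
  by_cases hneg : sample < 0
  · have h18 : (pyBinFmt sample 18).head? = some '-' := by
      unfold pyBinFmt; simp [if_pos hneg]
    rw [if_pos h18]
    have h19 : pyBinFmt sample 19 =
        ['-', '0', 'b'] ++ (List.replicate (16 - (pvBits sample.natAbs).length) '0'
          ++ pvBits sample.natAbs) := by
      unfold pyBinFmt
      rw [if_pos hneg]
      simp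
    rw [h19]
    have hidx : ((['-', '0', 'b'] : List Char) ++ (List.replicate (16 - (pvBits sample.natAbs).length) '0'
        ++ pvBits sample.natAbs)).length - 3 = (['-', '0', 'b'] : List Char).length + 13 := by
      rw [List.length_append, hD16]
      simp
    rw [hidx, pvSplice_prefix]
    simp only [List.cons_append, List.nil_append, List.head?_cons, List.drop_succ_cons,
      List.drop_zero, reduceIte]
    rw [hcore]
    rw [if_pos hneg, if_pos h8, hdiv0]
    simp [Nat.zero_shiftLeft]
  · have h18 : pyBinFmt sample 18 =
        ['0', 'b'] ++ (List.replicate (16 - (pvBits sample.natAbs).length) '0'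
          ++ pvBits sample.natAbs) := by
      unfold pyBinFmt
      rw [if_neg hneg]
      simp
    rw [h18]
    have hh : ¬ (((['0', 'b'] : List Char) ++ (List.replicate (16 - (pvBits sample.natAbs).length) '0'
        ++ pvBits sample.natAbs)).head? = some '-') := by simp
    rw [if_neg hh]
    have hidx : ((['0', 'b'] : List Char) ++ (List.replicate (16 - (pvBits sample.natAbs).length) '0'
        ++ pvBits sample.natAbs)).length - 3 = (['0', 'b'] : List Char).length + 13 := by
      rw [List.length_append, hD16]
      simp
    rw [hidx, pvSplice_prefix]
    simp only [List.cons_append, List.nil_append, List.head?_cons, List.drop_succ_cons,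
      List.drop_zero, reduceIte]
    rw [hcore]
    rw [if_neg hneg, if_pos h8, hdiv0]
    simp [Nat.zero_shiftLeft]

-- ===== VERDICT (by name: the statement is the Claim_ definition above) =====
theorem bit_selection_replaced_spec : Claim_equal_bit_selection_replaced := by
  intro sample bm _hDom hPre
  have hbin : ∀ c ∈ bm.toList, c = '0' ∨ c = '1' := by
    intro c hc
    have h := (List.all_eq_true.mp hPre) c hc
    simpa using h
  unfold Spec_bit_selection_replaced
  by_cases h8 : 8 ≤ sample.natAbs
  · exact pv_main_ge8 sample bm hbin h8
  · exact pv_main_lt8 sample bm hbin (by omega)
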